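-- pv_equiv track=rewrite | github.com/Brehond/outerskies | chart/services/aspect_calculator.py | get_aspect_summary
-- ===== SOURCE A (Python) =====
-- from typing import Dict, List, Any, Tuple
--
-- def get_aspect_summary(aspects: Dict[str, List[Dict[str, Any]]]) -> str:
--     """
--     Generate a summary of all aspects
--
--     Args:
--         aspects: Dictionary of aspects by planet
--
--     Returns:
--         Summary string
--     """
--     aspect_counts = {}
--     total_aspects = 0
--
--     for planet_aspects in aspects.values():
--         for aspect in planet_aspects:
--             aspect_type = aspect["type"]
--             aspect_counts[aspect_type] = aspect_counts.get(aspect_type, 0) + 1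
--             total_aspects += 1
--
--     if not aspect_counts:
--         return "No major aspects found"
--
--     summary_parts = []
--     for aspect_type, count in aspect_counts.items():
--         summary_parts.append(f"{count} {aspect_type}")
--
--     return f"Total aspects: {total_aspects}. " + ", ".join(summary_parts)
-- ===== SOURCE B (Python) =====
-- def get_aspect_summary(aspects):
--     flat = [a["type"] for planet_aspects in aspects.values() for a in planet_aspects]
--     if not flat:
--         return "No major aspects found"
--     parts = []
--     rest = flat
--     while rest:
--         t = rest[0]
--         remaining = [x for x in rest if x != t]
--         parts.append(f"{len(rest) - len(remaining)} {t}")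
--         rest = remaining
--     return f"Total aspects: {len(flat)}. " + ", ".join(parts)
-- ===== Notes on version B (the rewrite author's own statement) =====
-- stated objective: alternative
-- what changed: B flattens all aspect types into one list and then repeatedly partitions it: take the first type, filter out all its occurrences, and read the count off the length difference - no counting dict or running total is maintained at all.
import Mathlib
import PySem

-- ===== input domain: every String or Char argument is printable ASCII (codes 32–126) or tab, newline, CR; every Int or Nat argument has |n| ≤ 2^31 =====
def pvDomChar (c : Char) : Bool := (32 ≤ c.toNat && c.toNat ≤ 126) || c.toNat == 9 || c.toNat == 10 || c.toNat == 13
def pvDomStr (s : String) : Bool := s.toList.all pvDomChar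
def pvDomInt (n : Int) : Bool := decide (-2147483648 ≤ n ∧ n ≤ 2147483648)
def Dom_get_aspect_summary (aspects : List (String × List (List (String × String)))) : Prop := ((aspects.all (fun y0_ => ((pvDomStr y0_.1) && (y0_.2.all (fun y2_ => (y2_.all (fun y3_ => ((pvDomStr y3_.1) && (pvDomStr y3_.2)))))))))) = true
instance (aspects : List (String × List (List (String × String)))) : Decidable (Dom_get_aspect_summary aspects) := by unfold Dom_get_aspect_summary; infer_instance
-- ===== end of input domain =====

-- B flattens all aspect types into one list, then repeatedly partitions it (take the first type,
-- filter out all its occurrences, read the count off the length difference) instead of A's single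
-- accumulating pass with a counts dict and running total (alternative decomposition, no counter).


-- shared helper: aspect["type"] (Pre_ guarantees the key is present; Python raises KeyError otherwise)
def pvType (a : List (String × String)) : String := (PySem.Dict.mk a).getD "type" ""

-- ===== PORT A =====
def get_aspect_summary (aspects : List (String × List (List (String × String)))) : String :=
  let st : PySem.Dict String Int × Int :=
    aspects.foldl (fun s pa =>
      pa.2.foldl (fun (s : PySem.Dict String Int × Int) aspect =>
        let t := pvType aspect
        (s.1.insert t (s.1.getD t 0 + 1), s.2 + 1)) s)
      (PySem.Dict.empty, 0)
  if st.1.items = [] then "No major aspects found"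
  else
    let parts := st.1.items.foldl (fun acc p => acc ++ [PySem.Int.toStr p.2 ++ " " ++ p.1]) []
    "Total aspects: " ++ PySem.Int.toStr st.2 ++ ". " ++ PySem.Str.join ", " parts

-- ===== PORT B =====
-- the while loop of Source B: partition off the first type, count = length difference
def pvParts : List String → List String
  | [] => []
  | t :: l =>
    let remaining := (t :: l).filter (fun x => x != t)
    (PySem.Int.toStr (((t :: l).length : Int) - (remaining.length : Int)) ++ " " ++ t) :: pvParts remaining
termination_by rest => rest.length
decreasing_by
  simp only [List.filter_cons, bne_self_eq_false, List.length_cons]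
  exact Nat.lt_succ_of_le (List.length_filter_le _ _)

def get_aspect_summary_alt (aspects : List (String × List (List (String × String)))) : String :=
  let flat := aspects.flatMap (fun pa => pa.2.map pvType)
  if flat = [] then "No major aspects found"
  else
    "Total aspects: " ++ PySem.Int.toStr (flat.length : Int) ++ ". " ++ PySem.Str.join ", " (pvParts flat)

-- ===== PRECONDITION & SPEC =====
-- Pre_ excludes (a) inner aspect dicts lacking the "type" key, on which A raises KeyError, and
-- (b) association lists with duplicate keys (outer or inner), which do not represent any Python dict.
-- no-duplicate check, executable
def pvNodupB : List String → Bool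
  | [] => true
  | x :: l => !(l.contains x) && pvNodupB l

def Pre_get_aspect_summary (aspects : List (String × List (List (String × String)))) : Prop :=
  (pvNodupB (aspects.map Prod.fst) &&
   aspects.all (fun pa => pa.2.all (fun a =>
     (a.map Prod.fst).contains "type" && pvNodupB (a.map Prod.fst)))) = true
instance (aspects : List (String × List (List (String × String)))) : Decidable (Pre_get_aspect_summary aspects) := by unfold Pre_get_aspect_summary; infer_instance

def pvWitness_get_aspect_summary : (List (String × List (List (String × String)))) :=
  [("Sun", [[("type", "trine")], [("type", "square")]]), ("Moon", [[("type", "trine")]])]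

def Spec_get_aspect_summary (aspects : List (String × List (List (String × String)))) (out : String) : Prop := out = get_aspect_summary_alt aspects
instance (aspects : List (String × List (List (String × String)))) (out : String) : Decidable (Spec_get_aspect_summary aspects out) := by unfold Spec_get_aspect_summary; infer_instance

-- ===== CLAIM (what is proved, stated in full; the proofs are below) =====
def Claim_equal_get_aspect_summary : Prop := ∀ (aspects : List (String × List (List (String × String)))), Dom_get_aspect_summary aspects → Pre_get_aspect_summary aspects → Spec_get_aspect_summary aspects (get_aspect_summary aspects)

-- ===== LEMMAS AND PROOFS =====

-- the inner loop of A, over one planet's aspect list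
theorem pv_inner (l : List (List (String × String))) (d : PySem.Dict String Int) (n : Int) :
    l.foldl (fun (s : PySem.Dict String Int × Int) aspect =>
        let t := pvType aspect
        (s.1.insert t (s.1.getD t 0 + 1), s.2 + 1)) (d, n)
    = ((l.map pvType).foldl (fun d t => d.insert t (d.getD t 0 + 1)) d, n + l.length) := by
  induction l generalizing d n with
  | nil => simp
  | cons a l ih => simp [ih]; omega

-- the outer loop of A equals one counter fold over the flattened type list plus a length count
theorem pv_outer (l : List (String × List (List (String × String)))) (d : PySem.Dict String Int) (n : Int) :
    l.foldl (fun s pa =>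
      pa.2.foldl (fun (s : PySem.Dict String Int × Int) aspect =>
        let t := pvType aspect
        (s.1.insert t (s.1.getD t 0 + 1), s.2 + 1)) s) (d, n)
    = ((l.flatMap (fun pa => pa.2.map pvType)).foldl (fun d t => d.insert t (d.getD t 0 + 1)) d,
       n + (l.flatMap (fun pa => pa.2.map pvType)).length) := by
  induction l generalizing d n with
  | nil => simp
  | cons pa l ih => simp [pv_inner, ih, List.foldl_append]; omega

-- Set.add over a list ignores elements already in the set
theorem pv_foldl_add_of_mem (t : String) (l : List String) (s : PySem.Set String)
    (hs : t ∈ s) :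
    l.foldl PySem.Set.add s = (l.filter (fun x => x != t)).foldl PySem.Set.add s := by
  induction l generalizing s with
  | nil => rfl
  | cons x l ih =>
    by_cases hx : x = t
    · subst hx
      simp only [List.filter_cons, bne_self_eq_false, Bool.false_eq_true, if_false,
        List.foldl_cons]
      have hadd : PySem.Set.add s x = s := by simp [PySem.Set.add, hs]
      rw [hadd, ih s hs]
    · have hb : (x != t) = true := by simp [hx]
      simp only [List.filter_cons, hb, if_true, List.foldl_cons]
      apply ih
      by_cases h : x ∈ s <;> simp [PySem.Set.add, h, hs]

-- a prepended fresh head commutes out of the Set.add fold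
theorem pv_foldl_add_cons (t : String) (m : List String) (s : PySem.Set String)
    (hm : ∀ x ∈ m, x ≠ t) (hts : t ∉ s) :
    m.foldl PySem.Set.add (t :: s) = t :: m.foldl PySem.Set.add s := by
  induction m generalizing s with
  | nil => rfl
  | cons x m ih =>
    have hx : x ≠ t := hm x (List.mem_cons_self ..)
    simp only [List.foldl_cons]
    by_cases h : x ∈ s
    · rw [show PySem.Set.add (t :: s) x = t :: s by simp [PySem.Set.add, h],
          show PySem.Set.add s x = s by simp [PySem.Set.add, h]]
      exact ih s (fun y hy => hm y (List.mem_cons_of_mem _ hy)) hts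
    · rw [show PySem.Set.add (t :: s) x = t :: (s ++ [x]) by
            simp [PySem.Set.add, h, hx],
          show PySem.Set.add s x = s ++ [x] by simp [PySem.Set.add, h]]
      exact ih (s ++ [x]) (fun y hy => hm y (List.mem_cons_of_mem _ hy))
        (by simp [hts, Ne.symm hx])

-- first-occurrence dedup, partition-style
theorem pv_dedup_cons (t : String) (l : List String) :
    PySem.List.dedup (t :: l) = t :: PySem.List.dedup (l.filter (fun x => x != t)) := by
  simp only [PySem.List.dedup_eq_ofList, PySem.Set.ofList_eq_foldl, List.foldl_cons]
  have h0 : PySem.Set.add ([] : PySem.Set String) t = [t] := by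
    simp [PySem.Set.add, PySem.Set.empty]
  rw [h0, pv_foldl_add_of_mem t l [t] (by simp)]
  exact pv_foldl_add_cons t _ [] (fun x hx => by simpa using (List.mem_filter.1 hx).2)
    (by simp)

-- the partition loop of B produces exactly the per-distinct-type counts, in first-occurrence order
theorem pv_parts_eq (xs : List String) :
    pvParts xs = (PySem.List.dedup xs).map
      (fun t => PySem.Int.toStr ((xs.count t : Int)) ++ " " ++ t) := by
  induction xs using pvParts.induct with
  | case1 => simp [pvParts]
  | case2 t l remaining ih =>
    rw [pvParts, pv_dedup_cons]
    have hrem : remaining = l.filter (fun x => x != t) := by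
      simp [remaining]
    have hcount : (((t :: l).length : Int) - (remaining.length : Int))
        = ((t :: l).count t : Int) := by
      have h1 : remaining.length = l.countP (fun x => x != t) := by
        rw [hrem, ← List.countP_eq_length_filter]
      have h2 : l.countP (fun x => x != t) + l.countP (fun x => !(x != t)) = l.length := by
        clear h1 ih hrem
        induction l with
        | nil => rfl
        | cons x l ih => cases h : x != t <;> simp [List.countP_cons, h] <;> omega
      have h3 : (t :: l).count t = l.countP (fun x => !(x != t)) + 1 := by
        rw [List.count_cons_self, List.count_eq_countP]
        congr 1
        exact List.countP_congr (fun x _ => by cases h : x == t <;> simp [bne, h])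
      simp only [List.length_cons, h1, h3]
      push_cast
      omega
    rw [hcount, ih, ← hrem]
    simp only [List.map_cons, List.cons.injEq, true_and]
    apply List.map_congr_left
    intro u hu
    have hu' : u ∈ remaining := (PySem.List.mem_dedup _ _).1 hu
    have hut : (u != t) = true := by
      rw [hrem] at hu'
      exact (List.mem_filter.1 hu').2
    have hne : u ≠ t := by simpa using hut
    have : remaining.count u = (t :: l).count u := by
      rw [hrem, List.count_filter (p := fun x => x != t) hut, List.count_cons_of_ne hne.symm]
    rw [this]

-- ===== VERDICT (by name: the statement is the Claim_ definition above) =====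
theorem get_aspect_summary_spec : Claim_equal_get_aspect_summary := by
  intro aspects _ _
  unfold Spec_get_aspect_summary get_aspect_summary get_aspect_summary_alt
  simp only [pv_outer, PySem.Dict.foldl_insert_getD_add_one_eq_counter]
  set flat := aspects.flatMap (fun pa => pa.2.map pvType) with hflat
  by_cases h : flat = []
  · rw [h]; rfl
  · have hitems := PySem.Dict.items_counter (xs := flat)
    have hne : (PySem.Dict.counter flat).items ≠ [] := by
      rw [hitems]
      simp only [ne_eq, List.map_eq_nil_iff]
      intro hn
      exact h (List.eq_nil_of_subset_nil (fun x hx => by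
        have := (PySem.Set.mem_ofList (xs := flat) (y := x)).2 hx
        simp [hn] at this))
    rw [if_neg hne, if_neg h]
    rw [PySem.List.foldl_append_singleton_eq_map (fun (p : String × Int) => PySem.Int.toStr p.2 ++ " " ++ p.1)]
    rw [hitems, List.map_map, pv_parts_eq]
    simp [Function.comp_def, PySem.List.dedup_eq_ofList]
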